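-- pv_equiv track=rewrite | github.com/thierryxdp/TCC | problems/810/solution_239341.py | rp
-- ===== SOURCE A (Python) =====
-- def rp(f):
--     f=str.replace(f,':',' ')
--     f=str.replace(f,';',' ')
--     f=str.replace(f,'.',' ')
--     f=str.replace(f,'?',' ')
--     f=str.replace(f,',',' ')
--     f=str.replace(f,'-',' ')
--     f=str.replace(f,'!',' ')
--     return f
--     listap=str.split(rp(f),' ')
--     strinverte=str.join(' ',listap[::-1])
--     return strinverte
-- ===== SOURCE B (Python) =====
-- PUNCT = {':', ';', '.', '?', ',', '-', '!'}
--
-- def rp(f):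
--     return ''.join(' ' if c in PUNCT else c for c in f)
-- ===== Notes on version B (the rewrite author's own statement) =====
-- stated objective: idiomatic
-- what changed: Seven sequential full-string str.replace passes are replaced by one single pass over the characters with a set-membership test, joining the result once.
import Mathlib
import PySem

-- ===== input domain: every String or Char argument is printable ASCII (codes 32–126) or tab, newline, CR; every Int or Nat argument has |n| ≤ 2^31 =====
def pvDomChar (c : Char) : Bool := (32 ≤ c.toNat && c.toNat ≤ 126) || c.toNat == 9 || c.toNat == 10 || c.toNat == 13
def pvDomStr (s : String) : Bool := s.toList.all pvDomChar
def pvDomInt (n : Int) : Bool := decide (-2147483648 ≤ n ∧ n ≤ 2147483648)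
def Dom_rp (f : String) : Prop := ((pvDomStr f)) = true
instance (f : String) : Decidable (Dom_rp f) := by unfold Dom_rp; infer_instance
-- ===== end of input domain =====

-- B replaces A's seven sequential str.replace passes with one single pass and a membership
-- test (objective: idiomatic single traversal); same return value on every input.

-- ===== PORT A =====
def rp (f : String) : String :=
  let f := PySem.Str.replace f ":" " "
  let f := PySem.Str.replace f ";" " "
  let f := PySem.Str.replace f "." " "
  let f := PySem.Str.replace f "?" " "
  let f := PySem.Str.replace f "," " "
  let f := PySem.Str.replace f "-" " "
  let f := PySem.Str.replace f "!" " "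
  f

-- ===== PORT B =====
def rpPunct : List Char := [':', ';', '.', '?', ',', '-', '!']

def rp_alt (f : String) : String :=
  String.ofList (f.toList.map (fun c => if c ∈ rpPunct then ' ' else c))

-- ===== PRECONDITION & SPEC =====
def Spec_rp (f : String) (out : String) : Prop := out = rp_alt f
instance (f : String) (out : String) : Decidable (Spec_rp f out) := by unfold Spec_rp; infer_instance

-- ===== CLAIM (what is proved, stated in full; the proofs are below) =====
def Claim_equal_rp : Prop := ∀ (f : String), Dom_rp f → Spec_rp f (rp f)

-- ===== LEMMAS AND PROOFS =====

-- replacing a single character by a single character is a map over the characters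
theorem rp_go_single (o n : Char) :
    ∀ (l : List Char) (fuel : Nat) (acc : List Char), l.length ≤ fuel →
      PySem.Chars.replace.go [o] [n] fuel l acc =
        acc.reverse ++ l.map (fun c => if c = o then n else c) := by
  intro l
  induction l with
  | nil =>
    intro fuel acc _
    cases fuel <;> simp [PySem.Chars.replace.go]
  | cons c t ih =>
    intro fuel acc h
    cases fuel with
    | zero => simp at h
    | succ fuel =>
      simp only [List.length_cons, Nat.succ_le_succ_iff] at h
      by_cases hc : c = o
      · subst hc
        have : ([c].isPrefixOf (c :: t)) = true := by
          simp [List.isPrefixOf]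
        simp only [PySem.Chars.replace.go, this, if_true]
        rw [show List.drop [c].length (c :: t) = t from rfl, ih fuel _ h]
        simp
      · have : ([o].isPrefixOf (c :: t)) = true ↔ False := by
          simp [List.isPrefixOf]
          exact fun h' => hc h'.symm
        simp only [PySem.Chars.replace.go]
        rw [if_neg (by simpa using this.mp)]
        rw [ih fuel _ h]
        simp [hc]

theorem rp_replace_single (o n : Char) (s : List Char) :
    PySem.Chars.replace s [o] [n] = s.map (fun c => if c = o then n else c) := by
  unfold PySem.Chars.replace
  rw [if_neg (by simp)]
  simpa using rp_go_single o n s s.length [] le_rfl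

set_option maxHeartbeats 1000000 in
theorem rp_toList (f : String) :
    (rp f).toList = f.toList.map (fun c => if c ∈ rpPunct then ' ' else c) := by
  simp only [rp, PySem.Str.toList_replace,
    show (":" : String).toList = [':'] from rfl,
    show (";" : String).toList = [';'] from rfl,
    show ("." : String).toList = ['.'] from rfl,
    show ("?" : String).toList = ['?'] from rfl,
    show ("," : String).toList = [','] from rfl,
    show ("-" : String).toList = ['-'] from rfl,
    show (" " : String).toList = [' '] from rfl,
    show ("!" : String).toList = ['!'] from rfl,
    rp_replace_single, List.map_map]
  apply List.map_congr_left
  intro c _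
  simp only [Function.comp, rpPunct, List.mem_cons, List.not_mem_nil, or_false]
  split_ifs <;> simp_all

-- ===== VERDICT (by name: the statement is the Claim_ definition above) =====
theorem rp_spec : Claim_equal_rp := by
  intro f _
  unfold Spec_rp rp_alt
  exact String.toList_inj.mp (by rw [String.toList_ofList, rp_toList])
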